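-- pv_equiv track=rewrite | github.com/atviriduomenys/spinta | spinta/core/config.py | _get_inner_keys
-- ===== SOURCE A (Python) =====
-- from typing import Any, Dict, List, Optional, Tuple, Union
-- import collections
--
-- def _get_inner_keys(config: Dict[tuple, Any], depth=1):
--     """Get inner keys for config.
--
--     `config` is flattened dict, that looks like this:
--
--         {
--             ('a', 'b', 'c'): 1,
--             ('a', 'b', 'd'): 2,
--         }
--
--     Nested version of this would look like this:
--
--         {
--             'a': {
--                 'b': {
--                     'c': 1,
--                     'd': 1,
--                 }
--             }
--         }
--
--     Then, the purpose of this function is to add keys to all inner nesting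
--     levels. For this example, function result will be:
--
--         {
--             ('a'): ['b'],
--             ('a', 'b'): ['c', 'd'],
--         }
--
--     This is needed for `RawConfig` class, in order to be able to do things like
--     this:
--
--         config.keys('a', 'b')
--         ['c', 'd']
--
--     And this functionality is needed, because of environment variables. For
--     example, in order to add a new backend, first you need to add new keys, like
--     this:
--
--         SPINTA_A=b,x
--
--     And then, you can add values to it:
--
--         SPINTA_A_X=3
--
--     And the end configuration will look like this:
--
--         {
--             'a': {
--                 'b': {
--                     'c': 1,
--                     'd': 1,
--                 },
--                 'x': '3'
--             }
--         }
--
--     """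
--     inner = collections.defaultdict(list)
--     for key in config.keys():
--         for i in range(depth, len(key)):
--             k = tuple(key[:i])
--             if key[i] not in inner[k]:
--                 inner[k].append(key[i])
--     return inner
-- ===== SOURCE B (Python) =====
-- import collections
--
-- def _get_inner_keys(config, depth=1):
--     # Build a trie of the flattened keys, logging each prefix (of length >= depth)
--     # the first time it gains a child; then read the children lists off the trie.
--     root = {}
--     order = []
--     for key in config.keys():
--         node = root
--         for i, part in enumerate(key):
--             if i >= depth and not node:
--                 order.append(key[:i])
--             node = node.setdefault(part, {})
--     inner = collections.defaultdict(list)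
--     for prefix in order:
--         node = root
--         for part in prefix:
--             node = node[part]
--         inner[prefix] = list(node.keys())
--     return inner
-- ===== Notes on version B (the rewrite author's own statement) =====
-- stated objective: alternative
-- what changed: Replaces A's per-position slicing with linear membership scans over a flat defaultdict by building a trie (nested dicts) of the keys once, logging each prefix the first time its node gains a child, and then reading each inner-key list straight off the trie in logged order.
-- outside the precondition, e.g. on _get_inner_keys({('a', 'b'): 1}, -1): A returns {('a',): ['b'], (): ['a']}, B returns {(): ['a'], ('a',): ['b']}; on _get_inner_keys({('a', 'b'): 1}, -3): A raises IndexError, B returns {(): ['a'], ('a',): ['b']}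
import Mathlib
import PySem

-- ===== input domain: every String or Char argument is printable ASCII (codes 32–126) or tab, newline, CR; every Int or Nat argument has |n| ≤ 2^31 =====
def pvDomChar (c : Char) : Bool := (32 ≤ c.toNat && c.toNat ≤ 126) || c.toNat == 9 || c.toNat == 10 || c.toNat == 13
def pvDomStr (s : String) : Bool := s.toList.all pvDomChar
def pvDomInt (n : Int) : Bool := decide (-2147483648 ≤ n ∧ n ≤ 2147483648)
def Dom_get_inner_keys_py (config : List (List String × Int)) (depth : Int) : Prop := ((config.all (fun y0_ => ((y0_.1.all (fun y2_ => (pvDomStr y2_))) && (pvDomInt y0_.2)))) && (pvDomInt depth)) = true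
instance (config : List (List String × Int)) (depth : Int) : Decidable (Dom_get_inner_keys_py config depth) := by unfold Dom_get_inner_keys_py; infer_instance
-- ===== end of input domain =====

-- B replaces A's slice-every-position/list-scan loop by building a trie of the keys once
-- (logging each prefix the first time it gains a child) and reading the children lists off the trie (objective: alternative).

-- ===== PORT A =====
-- A: inner = defaultdict(list); for key in config.keys(): for i in range(depth, len(key)):
--        k = key[:i];  if key[i] not in inner[k]: inner[k].append(key[i])
def get_inner_keys_py (config : List (List String × Int)) (depth : Int) : List (List String × List String) :=
  let inner : PySem.Dict (List String) (List String) :=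
    (PySem.Dict.ofList config).keys.foldl (fun inner key =>
      (PySem.List.pyRange depth (key.length : Int) 1).foldl (fun inner i =>
        match PySem.List.pyGet? key i with
        | none => inner   -- key[i] IndexError (reachable only for depth < 0, outside Pre_)
        | some x =>
          let k := PySem.List.slice key none (some i)     -- key[:i]
          let cur := inner.getD k []                      -- defaultdict access inner[k]
          inner.insert k (if x ∈ cur then cur else cur ++ [x])) inner)
      PySem.Dict.empty
  inner.items

-- ===== PORT B =====
-- The trie of Source B: a node's children, in insertion order, as a sibling chain
-- (cons name childSubtrie restOfSiblings); .nil = the empty dict {}.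
inductive PvTrie where
  | nil : PvTrie
  | cons : String → PvTrie → PvTrie → PvTrie
deriving DecidableEq, Repr

def pvChildGet? : PvTrie → String → Option PvTrie
  | .nil, _ => none
  | .cons s c r, p => if s = p then some c else pvChildGet? r p

-- node.setdefault(part, {}): keep an existing child in place, else append a fresh empty one
def pvSetdefault : PvTrie → String → PvTrie
  | .nil, p => .cons p .nil .nil
  | .cons s c r, p => if s = p then .cons s c r else .cons s c (pvSetdefault r p)

-- replace (in place) or append child p with subtree c'
def pvSetChild : PvTrie → String → PvTrie → PvTrie
  | .nil, p, c' => .cons p c' .nil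
  | .cons s c r, p, c' => if s = p then .cons s c' r else .cons s c (pvSetChild r p c')

-- the node Source B's pointer reaches by node = node[part] descent (total: .nil where a child is missing,
-- which in B is unreachable — every recorded prefix is a path of the trie)
def pvDescendD : PvTrie → List String → PvTrie
  | t, [] => t
  | t, p :: ps => pvDescendD ((pvChildGet? t p).getD .nil) ps

-- in-place node.setdefault(part, {}) at the node at path k, as a functional path-copy update
def pvUpdateAt : PvTrie → List String → String → PvTrie
  | t, [], x => pvSetdefault t x
  | t, p :: ps, x => pvSetChild t p (pvUpdateAt ((pvChildGet? t p).getD .nil) ps x)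

def pvChildKeys : PvTrie → List String
  | .nil => []
  | .cons s _ r => s :: pvChildKeys r

-- B: build the trie over all keys, recording each prefix (len >= depth) when its node gains
-- its first child; then inner[prefix] = list(node.keys()) for each recorded prefix, in order.
def get_inner_keys_py_alt (config : List (List String × Int)) (depth : Int) : List (List String × List String) :=
  let st : PvTrie × List (List String) :=
    (PySem.Dict.ofList config).keys.foldl (fun st key =>
      (PySem.List.enumerate key 0).foldl (fun (st : PvTrie × List (List String)) ip =>
        let k := PySem.List.slice key none (some ip.1)    -- key[:i]
        let ord := if depth ≤ ip.1 ∧ pvDescendD st.1 k = PvTrie.nil then st.2 ++ [k] else st.2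
        (pvUpdateAt st.1 k ip.2, ord)) st)
      (PvTrie.nil, [])
  let inner : PySem.Dict (List String) (List String) :=
    st.2.foldl (fun d p => d.insert p (pvChildKeys (pvDescendD st.1 p))) PySem.Dict.empty
  inner.items

-- ===== PRECONDITION & SPEC =====
-- Pre_ restricts to the natural domain depth >= 0 (depth counts nesting levels; A's caller passes 1):
-- for depth < 0, A indexes key[i] with negative i, so it either raises IndexError (some key shorter
-- than -depth) or returns entries produced by negative-index wraparound.
def Pre_get_inner_keys_py (config : List (List String × Int)) (depth : Int) : Prop := 0 ≤ depth
instance (config : List (List String × Int)) (depth : Int) : Decidable (Pre_get_inner_keys_py config depth) := by unfold Pre_get_inner_keys_py; infer_instance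
def pvWitness_get_inner_keys_py : (List (List String × Int)) × Int := ([(["a", "b", "c"], 1), (["a", "b", "d"], 2)], 1)

def Spec_get_inner_keys_py (config : List (List String × Int)) (depth : Int) (out : List (List String × List String)) : Prop := out = get_inner_keys_py_alt config depth
instance (config : List (List String × Int)) (depth : Int) (out : List (List String × List String)) : Decidable (Spec_get_inner_keys_py config depth out) := by unfold Spec_get_inner_keys_py; infer_instance

-- ===== CLAIM (what is proved, stated in full; the proofs are below) =====
def Claim_equal_get_inner_keys_py : Prop := ∀ (config : List (List String × Int)) (depth : Int), Dom_get_inner_keys_py config depth → Pre_get_inner_keys_py config depth → Spec_get_inner_keys_py config depth (get_inner_keys_py config depth)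

-- ===== LEMMAS AND PROOFS =====

-- Option-valued descent: some node while the path exists, none where it leaves the trie.
def pvDescend? : PvTrie → List String → Option PvTrie
  | t, [] => some t
  | t, p :: ps => match pvChildGet? t p with
    | some c => pvDescend? c ps
    | none => none

-- the simulation invariant tying A's dict to B's (trie, order-log) state
def PvInv (depth : Int) (t : PvTrie) (ord : List (List String)) (dict : PySem.Dict (List String) (List String)) : Prop :=
  dict = PySem.Dict.mk (ord.map (fun p => (p, pvChildKeys (pvDescendD t p)))) ∧
  ord.Nodup ∧
  ∀ p : List String, p ∈ ord ↔ ((depth ≤ (p.length : Int)) ∧ pvDescendD t p ≠ PvTrie.nil)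

-- canonical per-position steps (both ports' inner loops are folds of these over List.range key.length)
def pvAStep (depth : Int) (key : List String) (dict : PySem.Dict (List String) (List String)) (j : Nat) : PySem.Dict (List String) (List String) :=
  if depth ≤ (j : Int) then
    let k := key.take j
    let x := key.getD j ""
    let cur := dict.getD k []
    dict.insert k (if x ∈ cur then cur else cur ++ [x])
  else dict

def pvBStep (depth : Int) (key : List String) (st : PvTrie × List (List String)) (j : Nat) : PvTrie × List (List String) :=
  let k := key.take j
  (pvUpdateAt st.1 k (key.getD j ""),
   if depth ≤ (j : Int) ∧ pvDescendD st.1 k = PvTrie.nil then st.2 ++ [k] else st.2)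

theorem pv_descendD_nil (p : List String) : pvDescendD PvTrie.nil p = PvTrie.nil := by
  induction p with
  | nil => rfl
  | cons q qs ih => simpa [pvDescendD, pvChildGet?] using ih

theorem pv_descendD_of_descend?_some {t : PvTrie} {k : List String} {n : PvTrie}
    (h : pvDescend? t k = some n) : pvDescendD t k = n := by
  induction k generalizing t with
  | nil => simpa [pvDescend?, pvDescendD] using h
  | cons q qs ih =>
    cases hc : pvChildGet? t q with
    | none => simp [pvDescend?, hc] at h
    | some c =>
      rw [pvDescend?] at h
      simp only [hc] at h
      simpa [pvDescendD, hc] using ih h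

theorem pv_childGet?_setdefault (n : PvTrie) (x q : String) :
    pvChildGet? (pvSetdefault n x) q =
      if q = x then some ((pvChildGet? n x).getD PvTrie.nil) else pvChildGet? n q := by
  induction n with
  | nil =>
    by_cases h : q = x
    · subst h; simp [pvSetdefault, pvChildGet?]
    · have h2 : x ≠ q := fun hh => h hh.symm
      simp [pvSetdefault, pvChildGet?, h, h2]
  | cons s c r ihc ihr =>
    by_cases hs : s = x
    · subst hs
      by_cases h : q = s
      · subst h; simp [pvSetdefault, pvChildGet?]
      · have h2 : s ≠ q := fun hh => h hh.symm
        simp [pvSetdefault, pvChildGet?, h, h2]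
    · rw [pvSetdefault]
      simp only [hs, if_false]
      by_cases h : s = q
      · subst h
        simp [pvChildGet?, hs]
      · simp [pvChildGet?, h, hs, ihr]

theorem pv_childKeys_setdefault (n : PvTrie) (x : String) :
    pvChildKeys (pvSetdefault n x) =
      if x ∈ pvChildKeys n then pvChildKeys n else pvChildKeys n ++ [x] := by
  induction n with
  | nil => simp [pvSetdefault, pvChildKeys]
  | cons s c r ihc ihr =>
    by_cases hs : s = x
    · subst hs; simp [pvSetdefault, pvChildKeys]
    · rw [pvSetdefault]
      simp only [hs, if_false]
      have h2 : x ≠ s := fun hh => hs hh.symm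
      simp [pvChildKeys, ihr, h2]
      split_ifs <;> simp

theorem pv_setdefault_ne_nil (n : PvTrie) (x : String) : pvSetdefault n x ≠ PvTrie.nil := by
  cases n with
  | nil => simp [pvSetdefault]
  | cons s c r => by_cases h : s = x <;> simp [pvSetdefault, h]

theorem pv_childGet?_setChild (t : PvTrie) (a : String) (c' : PvTrie) (q : String) :
    pvChildGet? (pvSetChild t a c') q = if q = a then some c' else pvChildGet? t q := by
  induction t with
  | nil =>
    by_cases h : q = a
    · subst h; simp [pvSetChild, pvChildGet?]
    · have h2 : a ≠ q := fun hh => h hh.symm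
      simp [pvSetChild, pvChildGet?, h, h2]
  | cons s c r ihc ihr =>
    by_cases hs : s = a
    · subst hs
      by_cases h : q = s
      · subst h; simp [pvSetChild, pvChildGet?]
      · have h2 : s ≠ q := fun hh => h hh.symm
        simp [pvSetChild, pvChildGet?, h, h2]
    · rw [pvSetChild]
      simp only [hs, if_false]
      by_cases h : s = q
      · subst h
        simp [pvChildGet?, hs]
      · simp [pvChildGet?, h, ihr]

theorem pv_setChild_ne_nil (t : PvTrie) (a : String) (c' : PvTrie) : pvSetChild t a c' ≠ PvTrie.nil := by
  cases t with
  | nil => simp [pvSetChild]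
  | cons s c r => by_cases h : s = a <;> simp [pvSetChild, h]

theorem pv_childKeys_setChild_of_mem (t : PvTrie) (a : String) (c' : PvTrie)
    (h : a ∈ pvChildKeys t) : pvChildKeys (pvSetChild t a c') = pvChildKeys t := by
  induction t with
  | nil => simp [pvChildKeys] at h
  | cons s c r ihc ihr =>
    by_cases hs : s = a
    · subst hs; simp [pvSetChild, pvChildKeys]
    · rw [pvChildKeys, List.mem_cons] at h
      have h3 : a ∈ pvChildKeys r := h.resolve_left (fun hh => hs hh.symm)
      simp [pvSetChild, pvChildKeys, hs, ihr h3]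

theorem pv_mem_childKeys_of_childGet?_some {t : PvTrie} {a : String} {c : PvTrie}
    (h : pvChildGet? t a = some c) : a ∈ pvChildKeys t := by
  induction t with
  | nil => simp [pvChildGet?] at h
  | cons s c r ihc ihr =>
    by_cases hs : s = a
    · simp [pvChildKeys, hs]
    · rw [pvChildGet?] at h
      simp only [hs, if_false] at h
      simp [pvChildKeys, ihr h]

theorem pv_updateAt_localized {k : List String} {t n : PvTrie} (x : String)
    (h : pvDescend? t k = some n) :
    ∀ p : List String, p ≠ k →
      pvChildKeys (pvDescendD (pvUpdateAt t k x) p) = pvChildKeys (pvDescendD t p) ∧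
      (pvDescendD (pvUpdateAt t k x) p = PvTrie.nil ↔ pvDescendD t p = PvTrie.nil) := by
  induction k generalizing t n with
  | nil =>
    rw [pvDescend?] at h
    obtain rfl : t = n := by injection h
    intro p hp
    cases p with
    | nil => exact absurd rfl hp
    | cons q qs =>
      have hg : (pvChildGet? (pvSetdefault t x) q).getD PvTrie.nil = (pvChildGet? t q).getD PvTrie.nil := by
        rw [pv_childGet?_setdefault]
        split_ifs with hqx
        · subst hqx; simp
        · rfl
      rw [pvUpdateAt, pvDescendD, pvDescendD, hg]
      exact ⟨rfl, Iff.rfl⟩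
  | cons a as ih =>
    rw [pvDescend?] at h
    cases hc : pvChildGet? t a with
    | none => simp [hc] at h
    | some c =>
      simp only [hc] at h
      intro p hp
      have ht : t ≠ PvTrie.nil := by
        intro hnil; subst hnil; simp [pvChildGet?] at hc
      rw [pvUpdateAt]
      simp only [hc, Option.getD_some]
      cases p with
      | nil =>
        refine ⟨?_, ?_⟩
        · exact pv_childKeys_setChild_of_mem t a _ (pv_mem_childKeys_of_childGet?_some hc)
        · simp [pvDescendD, pv_setChild_ne_nil, ht]
      | cons q qs =>
        by_cases hq : q = a
        · subst hq
          have hqs : qs ≠ as := by intro hh; exact hp (by rw [hh])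
          rw [pvDescendD, pvDescendD, pv_childGet?_setChild, if_pos rfl]
          simp only [hc, Option.getD_some]
          exact ih h qs hqs
        · rw [pvDescendD, pvDescendD, pv_childGet?_setChild, if_neg hq]
          exact ⟨rfl, Iff.rfl⟩

theorem pv_descend?_updateAt_self {k : List String} {t n : PvTrie} (x : String)
    (h : pvDescend? t k = some n) :
    pvDescend? (pvUpdateAt t k x) k = some (pvSetdefault n x) := by
  induction k generalizing t n with
  | nil =>
    rw [pvDescend?] at h
    cases h
    rfl
  | cons q qs ih =>
    rw [pvDescend?] at h
    cases hc : pvChildGet? t q with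
    | none => simp [hc] at h
    | some c =>
      simp only [hc] at h
      rw [pvUpdateAt, pvDescend?, pv_childGet?_setChild]
      simp only [hc, Option.getD_some]
      exact ih h

theorem pv_descend?_append_singleton (t : PvTrie) (k : List String) (x : String) :
    pvDescend? t (k ++ [x]) = (pvDescend? t k).bind (fun n => pvChildGet? n x) := by
  induction k generalizing t with
  | nil =>
    cases hc : pvChildGet? t x <;> simp [pvDescend?, hc]
  | cons q qs ih =>
    cases hc : pvChildGet? t q with
    | none => simp [pvDescend?, hc]
    | some c =>
      rw [List.cons_append, pvDescend?, pvDescend?]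
      simp only [hc]
      exact ih c

theorem pv_step (depth : Int) (key : List String) (j : Nat) (hj : j < key.length)
    (t : PvTrie) (ord : List (List String)) (dict : PySem.Dict (List String) (List String))
    (hinv : PvInv depth t ord dict) (hpath : (pvDescend? t (key.take j)).isSome) :
    PvInv depth (pvBStep depth key (t, ord) j).1 (pvBStep depth key (t, ord) j).2 (pvAStep depth key dict j) ∧
    (pvDescend? (pvBStep depth key (t, ord) j).1 (key.take (j + 1))).isSome := by
  obtain ⟨n, hn⟩ := Option.isSome_iff_exists.mp hpath
  obtain ⟨hd, hnd, hmem⟩ := hinv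
  set k := key.take j with hkdef
  have hk : k.length = j := by
    rw [hkdef, List.length_take]; omega
  have hx : key.getD j "" = key[j] := List.getD_eq_getElem key "" hj
  have hDk : pvDescendD t k = n := pv_descendD_of_descend?_some hn
  have hloc := pv_updateAt_localized (key.getD j "") hn
  have hself : pvDescend? (pvUpdateAt t k (key.getD j "")) k = some (pvSetdefault n (key.getD j "")) :=
    pv_descend?_updateAt_self (key.getD j "") hn
  have hDk' : pvDescendD (pvUpdateAt t k (key.getD j "")) k = pvSetdefault n (key.getD j "") :=
    pv_descendD_of_descend?_some hself
  have hkeys : (ord.map (fun p => (p, pvChildKeys (pvDescendD t p)))).map Prod.fst = ord := by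
    rw [List.map_map]; exact List.map_id ord
  refine ⟨?_, ?_⟩
  · -- invariant is preserved
    simp only [pvBStep, pvAStep]
    by_cases hb : depth ≤ (j : Int)
    · by_cases hnil : pvDescendD t k = PvTrie.nil
      · -- first touch of prefix k: A creates the entry, B records k
        have hnnil : n = PvTrie.nil := by rw [← hDk, hnil]
        subst hnnil
        have knotin : k ∉ ord := fun hin => ((hmem k).mp hin).2 hnil
        have hget : dict.get? k = none := by
          rw [hd, PySem.Dict.get?_eq_none_iff_not_mem_keys]
          simpa only [PySem.Dict.keys_mk, hkeys] using knotin
        have hgetD : dict.getD k [] = [] := by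
          rw [PySem.Dict.getD_eq_get?_getD, hget]; rfl
        have hcont : dict.contains k = false := by
          rw [PySem.Dict.contains_eq_isSome_get?, hget]; rfl
        rw [if_pos hb, if_pos ⟨hb, hnil⟩, hgetD]
        simp only [List.not_mem_nil, List.nil_append]
        refine ⟨?_, ?_, ?_⟩
        · apply PySem.Dict.ext
          rw [PySem.Dict.items_insert_of_not_contains _ _ hcont, hd]
          show _ = ((ord ++ [k]).map fun p => (p, pvChildKeys (pvDescendD (pvUpdateAt t k (key.getD j "")) p)))
          rw [List.map_append]
          congr 1
          · exact List.map_congr_left fun p hp => by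
              have hpk : p ≠ k := fun hh => knotin (hh ▸ hp)
              show (p, pvChildKeys (pvDescendD t p)) = (p, pvChildKeys (pvDescendD (pvUpdateAt t k (key.getD j "")) p))
              rw [(hloc p hpk).1]
          · rw [List.map_cons, List.map_nil, hDk']
            split_ifs with hmemnil
            · exact hmemnil.elim
            · rfl
        · exact List.nodup_append.mpr ⟨hnd, List.nodup_singleton _, fun a hain b hbk hab => by
            rw [List.mem_singleton] at hbk
            apply knotin
            rw [hkdef, ← hbk, ← hab]
            exact hain⟩
        · intro p
          by_cases hpk : p = k
          · subst hpk
            simp only [List.mem_append, List.mem_singleton]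
            constructor
            · intro _
              refine ⟨by rw [hk]; exact hb, ?_⟩
              rw [hDk']
              exact pv_setdefault_ne_nil _ _
            · intro _; exact Or.inr rfl
          · rw [List.mem_append, List.mem_singleton]
            constructor
            · intro hin
              have hin' : p ∈ ord := hin.resolve_right hpk
              obtain ⟨h1, h2⟩ := (hmem p).mp hin'
              exact ⟨h1, fun hh => h2 (((hloc p hpk).2).mp hh)⟩
            · intro ⟨h1, h2⟩
              exact Or.inl ((hmem p).mpr ⟨h1, fun hh => h2 (((hloc p hpk).2).mpr hh)⟩)
      · -- prefix k already has children: A appends to the existing entry (if new), B's log is unchanged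
        have kin : k ∈ ord := (hmem k).mpr ⟨by rw [hk]; exact hb, hnil⟩
        have hitems : (k, pvChildKeys (pvDescendD t k)) ∈ dict.items := by
          rw [hd]
          exact List.mem_map_of_mem kin
        have hkeysnd : dict.keys.Nodup := by
          rw [hd]
          show ((ord.map _).map Prod.fst).Nodup
          rw [hkeys]; exact hnd
        have hget : dict.get? k = some (pvChildKeys (pvDescendD t k)) :=
          PySem.Dict.get?_of_mem_items dict hitems hkeysnd
        have hgetD : dict.getD k [] = pvChildKeys n := by
          rw [PySem.Dict.getD_eq_get?_getD, hget, hDk]; rfl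
        have hcont : dict.contains k = true := by
          rw [PySem.Dict.contains_eq_isSome_get?, hget]; rfl
        have hnewv : (if key.getD j "" ∈ pvChildKeys n then pvChildKeys n else pvChildKeys n ++ [key.getD j ""]) = pvChildKeys (pvSetdefault n (key.getD j "")) := by
          rw [pv_childKeys_setdefault]
        rw [if_pos hb, if_neg (fun hh : depth ≤ (j:Int) ∧ pvDescendD t k = PvTrie.nil => hnil hh.2), hgetD]
        refine ⟨?_, hnd, ?_⟩
        · apply PySem.Dict.ext
          rw [PySem.Dict.items_insert_of_contains _ _ hcont, hd]
          show _ = ((ord.map fun p => (p, pvChildKeys (pvDescendD (pvUpdateAt t k (key.getD j "")) p))))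
          show ((ord.map fun p => (p, pvChildKeys (pvDescendD t p))).map _) = _
          rw [List.map_map]
          refine List.map_congr_left fun p hp => ?_
          by_cases hpk : p = k
          · subst hpk
            simp only [Function.comp, beq_self_eq_true, if_pos]
            rw [hDk', ← hnewv]
          · simp only [Function.comp]
            rw [if_neg (by simpa using hpk), (hloc p hpk).1]
        · intro p
          by_cases hpk : p = k
          · subst hpk
            constructor
            · intro _
              refine ⟨by rw [hk]; exact hb, ?_⟩
              rw [hDk']
              exact pv_setdefault_ne_nil _ _
            · intro _; exact kin
          · constructor
            · intro hin
              obtain ⟨h1, h2⟩ := (hmem p).mp hin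
              exact ⟨h1, fun hh => h2 (((hloc p hpk).2).mp hh)⟩
            · intro ⟨h1, h2⟩
              exact (hmem p).mpr ⟨h1, fun hh => h2 (((hloc p hpk).2).mpr hh)⟩
    · -- position below depth: A skips, B only extends the trie
      rw [if_neg hb, if_neg (fun hh : depth ≤ (j:Int) ∧ pvDescendD t k = PvTrie.nil => hb hh.1)]
      refine ⟨?_, hnd, ?_⟩
      · rw [hd]
        refine congrArg PySem.Dict.mk (List.map_congr_left fun p hp => ?_)
        have hpk : p ≠ k := by
          intro hh
          have := ((hmem p).mp hp).1
          rw [hh, hk] at this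
          exact hb this
        rw [(hloc p hpk).1]
      · intro p
        by_cases hpk : p = k
        · subst hpk
          constructor
          · intro hin
            have h1 := ((hmem _).mp hin).1
            rw [hk] at h1
            exact absurd h1 hb
          · intro hcon
            have h1 := hcon.1
            rw [hk] at h1
            exact absurd h1 hb
        · constructor
          · intro hin
            obtain ⟨h1, h2⟩ := (hmem p).mp hin
            exact ⟨h1, fun hh => h2 (((hloc p hpk).2).mp hh)⟩
          · intro ⟨h1, h2⟩
            exact (hmem p).mpr ⟨h1, fun hh => h2 (((hloc p hpk).2).mpr hh)⟩
  · -- the walked path now extends one level further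
    have htake : key.take (j + 1) = k ++ [key.getD j ""] := by
      rw [hx, hkdef, List.take_add_one, List.getElem?_eq_getElem hj]
      rfl
    simp only [pvBStep]
    rw [htake, pv_descend?_append_singleton, hself]
    simp [pv_childGet?_setdefault]

theorem pv_key (depth : Int) (key : List String)
    (t : PvTrie) (ord : List (List String)) (dict : PySem.Dict (List String) (List String))
    (hinv : PvInv depth t ord dict) :
    PvInv depth ((List.range key.length).foldl (pvBStep depth key) (t, ord)).1
      ((List.range key.length).foldl (pvBStep depth key) (t, ord)).2
      ((List.range key.length).foldl (pvAStep depth key) dict) := by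
  suffices h : ∀ m, m ≤ key.length →
      PvInv depth ((List.range m).foldl (pvBStep depth key) (t, ord)).1
        ((List.range m).foldl (pvBStep depth key) (t, ord)).2
        ((List.range m).foldl (pvAStep depth key) dict) ∧
      (pvDescend? ((List.range m).foldl (pvBStep depth key) (t, ord)).1 (key.take m)).isSome by
    exact (h key.length le_rfl).1
  intro m hm
  induction m with
  | zero => exact ⟨by simpa using hinv, by simp [pvDescend?]⟩
  | succ m ih =>
    obtain ⟨ih1, ih2⟩ := ih (Nat.le_of_succ_le hm)
    rw [List.range_succ, List.foldl_append, List.foldl_append, List.foldl_cons, List.foldl_nil, List.foldl_cons, List.foldl_nil]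
    exact pv_step depth key m (by omega) _ _ _ ih1 ih2

-- range(depth, n) is range(0, n) restricted to the indices >= depth (0 <= depth)
theorem pv_range_filter (d : Int) (hd : 0 ≤ d) (n : Nat) :
    (PySem.List.pyRange 0 (n : Int) 1).filter (fun i => decide (d ≤ i)) = PySem.List.pyRange d (n : Int) 1 := by
  induction n with
  | zero =>
    rw [PySem.List.pyRange_one_eq_nil (by omega), PySem.List.pyRange_one_eq_nil (by omega)]
    rfl
  | succ n ihn =>
    have hcast : ((n + 1 : Nat) : Int) = (n : Int) + 1 := by push_cast; ring
    rw [hcast, PySem.List.pyRange_one_succ_right (by omega), List.filter_append, ihn]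
    by_cases hdn : d ≤ (n : Int)
    · rw [PySem.List.pyRange_one_succ_right hdn]
      simp [hdn]
    · rw [PySem.List.pyRange_one_eq_nil (by omega), PySem.List.pyRange_one_eq_nil (by omega)]
      simp [hdn]

theorem pv_a_inner (depth : Int) (hd : 0 ≤ depth) (key : List String)
    (dict : PySem.Dict (List String) (List String)) :
    (PySem.List.pyRange depth (key.length : Int) 1).foldl (fun inner i =>
        match PySem.List.pyGet? key i with
        | none => inner
        | some x =>
          let k := PySem.List.slice key none (some i)
          let cur := inner.getD k []
          inner.insert k (if x ∈ cur then cur else cur ++ [x])) dict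
      = (List.range key.length).foldl (pvAStep depth key) dict := by
  rw [← pv_range_filter depth hd key.length]
  rw [← PySem.List.foldl_if_eq_foldl_filter]
  rw [PySem.List.pyRange_zero_nat, List.foldl_map]
  refine PySem.List.foldl_congr_mem _ _ _ _ ?_
  intro acc j hj
  rw [List.mem_range] at hj
  by_cases hb : depth ≤ (j : Int)
  · rw [if_pos (by simpa using hb), pvAStep, if_pos hb]
    rw [PySem.List.pyGet?_natCast, List.getElem?_eq_getElem hj]
    simp only [PySem.List.slice_to_natCast, List.getD_eq_getElem key "" hj]
  · rw [if_neg (by simpa using hb), pvAStep, if_neg hb]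

theorem pv_b_inner (depth : Int) (key : List String) (st : PvTrie × List (List String)) :
    (PySem.List.enumerate key 0).foldl (fun (st : PvTrie × List (List String)) ip =>
        let k := PySem.List.slice key none (some ip.1)
        let ord := if depth ≤ ip.1 ∧ pvDescendD st.1 k = PvTrie.nil then st.2 ++ [k] else st.2
        (pvUpdateAt st.1 k ip.2, ord)) st
      = (List.range key.length).foldl (pvBStep depth key) st := by
  rw [show PySem.List.enumerate key 0 = (PySem.List.pyRange 0 ((key.length : Int)) 1).map (fun j => (j, PySem.List.pyGetD key j "")) from PySem.List.enumerate_eq_map_pyRange key ""]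
  rw [List.foldl_map, PySem.List.pyRange_zero_nat, List.foldl_map]
  refine PySem.List.foldl_congr_mem _ _ _ _ ?_
  intro acc j hj
  simp only [pvBStep, PySem.List.slice_to_natCast, PySem.List.pyGetD_natCast]

theorem pv_keys (depth : Int) (keys : List (List String))
    (t : PvTrie) (ord : List (List String)) (dict : PySem.Dict (List String) (List String))
    (hinv : PvInv depth t ord dict) :
    PvInv depth
      (keys.foldl (fun st key => (List.range key.length).foldl (pvBStep depth key) st) (t, ord)).1
      (keys.foldl (fun st key => (List.range key.length).foldl (pvBStep depth key) st) (t, ord)).2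
      (keys.foldl (fun dict key => (List.range key.length).foldl (pvAStep depth key) dict) dict) := by
  induction keys generalizing t ord dict with
  | nil => simpa using hinv
  | cons key rest ih =>
    rw [List.foldl_cons, List.foldl_cons]
    exact ih _ _ _ (pv_key depth key t ord dict hinv)

theorem get_inner_keys_py_spec : Claim_equal_get_inner_keys_py := by
  intro config depth hdom hpre
  show get_inner_keys_py config depth = get_inner_keys_py_alt config depth
  have hd : (0 : Int) ≤ depth := hpre
  simp only [get_inner_keys_py, get_inner_keys_py_alt]
  rw [PySem.List.foldl_congr_mem _ _ _ _ (fun acc key _ => pv_a_inner depth hd key acc)]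
  rw [PySem.List.foldl_congr_mem _ _ _ _ (fun (acc : PvTrie × List (List String)) key _ => pv_b_inner depth key acc)]
  have hinv0 : PvInv depth PvTrie.nil [] PySem.Dict.empty :=
    ⟨rfl, List.nodup_nil, by intro p; simp [pv_descendD_nil]⟩
  obtain ⟨hdfin, hndfin, -⟩ :=
    pv_keys depth ((PySem.Dict.ofList config).keys) PvTrie.nil [] PySem.Dict.empty hinv0
  rw [hdfin]
  rw [PySem.Dict.items_foldl_insert_fresh _ (fun p => p)
        (fun p => pvChildKeys (pvDescendD ((PySem.Dict.ofList config).keys.foldl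
          (fun st key => (List.range key.length).foldl (pvBStep depth key) st) (PvTrie.nil, [])).1 p)) _
        (fun a _ => PySem.Dict.contains_empty a) (by simpa using hndfin)]
  rfl
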